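-- pv_equiv track=rewrite | github.com/grassknoted/prj_mouse_pain | train_multitask.py | build_merge_mapping
-- ===== SOURCE A (Python) =====
-- from typing import Dict, List, Tuple, Optional, Any
--
-- def build_merge_mapping(
--     orig_classes: List[str],
--     merge_idxs: List[int] = [1, 3, 5],
--     target_idx: int = 1,
--     merged_name: str = "1"
-- ) -> Tuple[List[str], Dict[int, int]]:
--     """
--     Build class merge mapping.
--
--     Args:
--         orig_classes: Original class names (e.g., ['rest', 'paw_withdraw', 'paw_lick', ...])
--         merge_idxs: Original indices to merge (e.g., [1, 3, 5])
--         target_idx: Target index to merge into (e.g., 1)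
--         merged_name: Name for merged class (e.g., "1")
--
--     Returns:
--         new_classes: List of merged class names
--         col_map: Mapping from old index to new index
--     """
--     # Create new class list
--     new_classes = []
--     col_map = {}
--     new_idx = 0
--
--     for i, cls in enumerate(orig_classes):
--         if i in merge_idxs:
--             if target_idx not in col_map.values():
--                 new_classes.append(merged_name)
--                 col_map[i] = len(new_classes) - 1
--             else:
--                 # Already mapped
--                 col_map[i] = [v for k, v in col_map.items() if k in merge_idxs][0]
--         else:
--             new_classes.append(cls)
--             col_map[i] = len(new_classes) - 1
--
--     # Deduplicate new_classes
--     seen = set()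
--     dedup_classes = []
--     final_col_map = {}
--     for i, cls in enumerate(orig_classes):
--         if i in merge_idxs:
--             if merged_name not in seen:
--                 dedup_classes.append(merged_name)
--                 seen.add(merged_name)
--             final_col_map[i] = dedup_classes.index(merged_name)
--         else:
--             if cls not in seen:
--                 dedup_classes.append(cls)
--                 seen.add(cls)
--             final_col_map[i] = dedup_classes.index(cls)
--
--     return dedup_classes, final_col_map
-- ===== SOURCE B (Python) =====
-- def build_merge_mapping(orig_classes, merge_idxs=[1, 3, 5], target_idx=1, merged_name="1"):
--     # Stateless prefix formulation: no seen-set, no incremental dedup list, no dedup.index scans.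
--     # A name's new index is the number of distinct effective names strictly before its first occurrence.
--     eff = [merged_name if i in merge_idxs else c for i, c in enumerate(orig_classes)]
--     dedup_classes = [name for j, name in enumerate(eff) if name not in eff[:j]]
--     final_col_map = {i: len(set(eff[:eff.index(name)])) for i, name in enumerate(eff)}
--     return dedup_classes, final_col_map
-- ===== Notes on version B (the rewrite author's own statement) =====
-- stated objective: alternative
-- what changed: A's dead first merge pass (which rescans col_map.values() and copies col_map.items() every iteration, and can even raise IndexError) is dropped and its stateful seen-set/incremental-dedup loop with repeated dedup_classes.index() scans is replaced by a stateless prefix formulation: dedup keeps a name iff it is absent from the prefix before it, and a name's new index is the number of distinct effective names before its first occurrence.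
-- crash fix: On inputs whose first in-range merge index i0 satisfies 0 <= target_idx < i0, A's first loop raises IndexError (indexing [0] into an empty comprehension); B simply returns the normal (dedup_classes, final_col_map) there. — e.g. on build_merge_mapping(["a", "b"], [1], 0, "m"): A raises IndexError, B returns (["a", "m"], [(0, 0), (1, 1)])
import Mathlib
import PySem

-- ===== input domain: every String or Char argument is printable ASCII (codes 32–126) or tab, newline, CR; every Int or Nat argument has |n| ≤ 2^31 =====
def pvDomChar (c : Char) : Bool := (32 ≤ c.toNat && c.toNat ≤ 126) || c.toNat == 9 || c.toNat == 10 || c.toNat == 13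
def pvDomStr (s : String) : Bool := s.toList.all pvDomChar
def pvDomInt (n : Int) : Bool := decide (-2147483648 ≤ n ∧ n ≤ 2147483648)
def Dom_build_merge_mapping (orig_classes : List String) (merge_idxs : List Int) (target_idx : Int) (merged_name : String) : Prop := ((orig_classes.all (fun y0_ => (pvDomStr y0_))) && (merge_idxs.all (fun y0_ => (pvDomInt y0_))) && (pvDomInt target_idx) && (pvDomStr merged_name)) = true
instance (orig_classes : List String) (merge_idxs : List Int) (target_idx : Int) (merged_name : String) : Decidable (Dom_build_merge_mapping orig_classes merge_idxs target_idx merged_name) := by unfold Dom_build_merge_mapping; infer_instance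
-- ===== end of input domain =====

-- B drops A's dead first pass (which raises IndexError on some inputs) and replaces A's stateful
-- seen-set/incremental-dedup loop by a stateless prefix formulation (a name is kept iff absent
-- from the prefix before it; its new index is the count of distinct names before its first
-- occurrence): objective 'alternative'.

-- ===== PORT A =====
-- A's first loop: builds new_classes/col_map which the function then discards.
-- Python's `[v for k, v in col_map.items() if k in merge_idxs][0]` raises IndexError when the
-- comprehension is empty; that input set is excluded by Pre_ below, the port uses pyGet?/getD there.
def aFirstStep (merge_idxs : List Int) (target_idx : Int) (merged_name : String)
    (st : List String × PySem.Dict Int Int) (p : Int × String) : List String × PySem.Dict Int Int :=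
  let new_classes := st.1
  let col_map := st.2
  if p.1 ∈ merge_idxs then
    if ¬ (target_idx ∈ col_map.values) then
      let new_classes := new_classes ++ [merged_name]
      (new_classes, col_map.insert p.1 ((new_classes.length : Int) - 1))
    else
      (new_classes, col_map.insert p.1
        ((PySem.List.pyGet? ((col_map.items.filter (fun kv => kv.1 ∈ merge_idxs)).map (·.2)) 0).getD 0))
  else
    let new_classes := new_classes ++ [p.2]
    (new_classes, col_map.insert p.1 ((new_classes.length : Int) - 1))

-- A's second loop step: state (seen, dedup_classes, final_col_map)
def aSecondStep (merge_idxs : List Int) (merged_name : String)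
    (st : PySem.Set String × List String × PySem.Dict Int Int) (p : Int × String) :
    PySem.Set String × List String × PySem.Dict Int Int :=
  let seen := st.1
  let dedup := st.2.1
  let fmap := st.2.2
  if p.1 ∈ merge_idxs then
    let (dedup, seen) :=
      if ¬ PySem.Set.contains seen merged_name then (dedup ++ [merged_name], PySem.Set.add seen merged_name)
      else (dedup, seen)
    (seen, dedup, fmap.insert p.1 (((PySem.List.index? dedup merged_name).getD 0 : Nat) : Int))
  else
    let (dedup, seen) :=
      if ¬ PySem.Set.contains seen p.2 then (dedup ++ [p.2], PySem.Set.add seen p.2)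
      else (dedup, seen)
    (seen, dedup, fmap.insert p.1 (((PySem.List.index? dedup p.2).getD 0 : Nat) : Int))

def build_merge_mapping (orig_classes : List String) (merge_idxs : List Int) (target_idx : Int) (merged_name : String) : List String × (List (Int × Int)) :=
  -- first loop (result unused by the Python function)
  let _first := List.foldl (aFirstStep merge_idxs target_idx merged_name)
    ([], PySem.Dict.empty) (PySem.List.enumerate orig_classes)
  -- second loop
  let st := List.foldl (aSecondStep merge_idxs merged_name)
    (PySem.Set.empty, [], PySem.Dict.empty) (PySem.List.enumerate orig_classes)
  (st.2.1, st.2.2.items)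

-- ===== PORT B =====
def build_merge_mapping_alt (orig_classes : List String) (merge_idxs : List Int) (target_idx : Int) (merged_name : String) : List String × (List (Int × Int)) :=
  let eff := (PySem.List.enumerate orig_classes).map
    (fun p => if p.1 ∈ merge_idxs then merged_name else p.2)
  -- [name for j, name in enumerate(eff) if name not in eff[:j]]
  let dedup_classes := ((PySem.List.enumerate eff).filter
    (fun p => !decide (p.2 ∈ PySem.List.slice eff none (some p.1)))).map (·.2)
  -- {i: len(set(eff[:eff.index(name)])) for i, name in enumerate(eff)}  (name is always in eff)
  let fmap : PySem.Dict Int Int := List.foldl (fun d (p : Int × String) => d.insert p.1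
      ((PySem.Set.ofList (PySem.List.slice eff none
        (some (((PySem.List.index? eff p.2).getD 0 : Nat) : Int)))).length : Int))
    PySem.Dict.empty (PySem.List.enumerate eff)
  (dedup_classes, fmap.items)

-- ===== PRECONDITION & SPEC =====
-- Pre_ excludes exactly the inputs on which A raises IndexError: those where the first in-range
-- index k lying in merge_idxs satisfies 0 ≤ target_idx < k (A's first loop then indexes [0] into
-- an empty list comprehension).
def Pre_build_merge_mapping (orig_classes : List String) (merge_idxs : List Int) (target_idx : Int) (merged_name : String) : Prop :=
  ∀ k : Nat, k < orig_classes.length → (k : Int) ∈ merge_idxs →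
    (∀ j : Nat, j < k → (j : Int) ∉ merge_idxs) →
    ((k : Int) ≤ target_idx ∨ target_idx < 0)
instance (orig_classes : List String) (merge_idxs : List Int) (target_idx : Int) (merged_name : String) : Decidable (Pre_build_merge_mapping orig_classes merge_idxs target_idx merged_name) := by unfold Pre_build_merge_mapping; infer_instance

def pvWitness_build_merge_mapping : List String × List Int × Int × String :=
  (["rest", "paw_withdraw", "paw_lick"], [1, 2], 1, "1")

-- On inputs whose first in-range merge index k satisfies 0 ≤ target_idx < k, A raises IndexError
-- in its dead first loop; B returns the normal (dedup_classes, final_col_map).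
def Raises_build_merge_mapping (orig_classes : List String) (merge_idxs : List Int) (target_idx : Int) (merged_name : String) : Prop :=
  ∃ k : Nat, k < orig_classes.length ∧ (k : Int) ∈ merge_idxs ∧
    (∀ j : Nat, j < k → (j : Int) ∉ merge_idxs) ∧
    0 ≤ target_idx ∧ target_idx < (k : Int)
instance (orig_classes : List String) (merge_idxs : List Int) (target_idx : Int) (merged_name : String) : Decidable (Raises_build_merge_mapping orig_classes merge_idxs target_idx merged_name) := by unfold Raises_build_merge_mapping; infer_instance

def pvRaiseWitness_build_merge_mapping : List String × List Int × Int × String :=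
  (["a", "b"], [1], 0, "m")
def pvRaiseWitnessOut_build_merge_mapping : List String × (List (Int × Int)) :=
  (["a", "m"], [(0, 0), (1, 1)])

def Spec_build_merge_mapping (orig_classes : List String) (merge_idxs : List Int) (target_idx : Int) (merged_name : String) (out : List String × (List (Int × Int))) : Prop := out = build_merge_mapping_alt orig_classes merge_idxs target_idx merged_name
instance (orig_classes : List String) (merge_idxs : List Int) (target_idx : Int) (merged_name : String) (out : List String × (List (Int × Int))) : Decidable (Spec_build_merge_mapping orig_classes merge_idxs target_idx merged_name out) := by unfold Spec_build_merge_mapping; infer_instance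

-- ===== CLAIM (what is proved, stated in full; the proofs are below) =====
def Claim_equal_build_merge_mapping : Prop := ∀ (orig_classes : List String) (merge_idxs : List Int) (target_idx : Int) (merged_name : String), Dom_build_merge_mapping orig_classes merge_idxs target_idx merged_name → Pre_build_merge_mapping orig_classes merge_idxs target_idx merged_name → Spec_build_merge_mapping orig_classes merge_idxs target_idx merged_name (build_merge_mapping orig_classes merge_idxs target_idx merged_name)

def Claim_raises_build_merge_mapping : Prop := (∀ (orig_classes : List String) (merge_idxs : List Int) (target_idx : Int) (merged_name : String), Dom_build_merge_mapping orig_classes merge_idxs target_idx merged_name → Raises_build_merge_mapping orig_classes merge_idxs target_idx merged_name → ¬ Pre_build_merge_mapping orig_classes merge_idxs target_idx merged_name) ∧ (Dom_build_merge_mapping (pvRaiseWitness_build_merge_mapping.1) (pvRaiseWitness_build_merge_mapping.2.1) (pvRaiseWitness_build_merge_mapping.2.2.1) (pvRaiseWitness_build_merge_mapping.2.2.2) ∧ Raises_build_merge_mapping (pvRaiseWitness_build_merge_mapping.1) (pvRaiseWitness_build_merge_mapping.2.1) (pvRaiseWitness_build_merge_mapping.2.2.1) (pvRaiseWitness_build_merge_mapping.2.2.2)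 ∧ build_merge_mapping_alt (pvRaiseWitness_build_merge_mapping.1) (pvRaiseWitness_build_merge_mapping.2.1) (pvRaiseWitness_build_merge_mapping.2.2.1) (pvRaiseWitness_build_merge_mapping.2.2.2) = pvRaiseWitnessOut_build_merge_mapping)

-- ===== LEMMAS AND PROOFS =====

-- uniform second-loop step: A's two branches perform the same code on the effective name
def uStep (st : PySem.Set String × List String × PySem.Dict Int Int) (p : Int × String) :
    PySem.Set String × List String × PySem.Dict Int Int :=
  let (dedup, seen) :=
    if ¬ PySem.Set.contains st.1 p.2 then (st.2.1 ++ [p.2], PySem.Set.add st.1 p.2)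
    else (st.2.1, st.1)
  (seen, dedup, st.2.2.insert p.1 (((PySem.List.index? dedup p.2).getD 0 : Nat) : Int))

lemma aSecond_eq_uStep (mi : List Int) (mn : String)
    (st : PySem.Set String × List String × PySem.Dict Int Int) (p : Int × String) :
    aSecondStep mi mn st p = uStep st (p.1, if p.1 ∈ mi then mn else p.2) := by
  by_cases h : p.1 ∈ mi <;> simp [aSecondStep, uStep, h]

lemma uStep_eq (dd : List String) (fm : PySem.Dict Int Int) (p : Int × String) :
    uStep (dd, dd, fm) p = (PySem.Set.add dd p.2, PySem.Set.add dd p.2,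
      fm.insert p.1 (((PySem.List.index? (PySem.Set.add dd p.2) p.2).getD 0 : Nat) : Int)) := by
  by_cases h : p.2 ∈ dd <;> simp [uStep, PySem.Set.add, h]

lemma loopU (l : List (Int × String)) : ∀ (dd : List String) (fm : PySem.Dict Int Int),
    List.foldl uStep (dd, dd, fm) l =
      (PySem.Set.update dd (l.map (·.2)), PySem.Set.update dd (l.map (·.2)),
       List.foldl (fun d (p : Int × String) => d.insert p.1
         (((PySem.List.index? (PySem.Set.update dd (l.map (·.2))) p.2).getD 0 : Nat) : Int)) fm l) := by
  induction l with
  | nil => intro dd fm; simp [PySem.Set.update]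
  | cons p l ih =>
    intro dd fm
    have hupd : PySem.Set.update dd ((p :: l).map (·.2))
        = PySem.Set.update (PySem.Set.add dd p.2) (l.map (·.2)) := rfl
    have hmem : p.2 ∈ PySem.Set.add dd p.2 := (PySem.Set.mem_add _ _ _).2 (Or.inr rfl)
    have hidx : PySem.List.index? (PySem.Set.update (PySem.Set.add dd p.2) (l.map (·.2))) p.2
        = PySem.List.index? (PySem.Set.add dd p.2) p.2 := by
      rw [PySem.Set.update_eq_append_filter]
      exact PySem.List.index?_append_of_mem _ hmem
    rw [List.foldl_cons, uStep_eq, ih, hupd, List.foldl_cons, hidx]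

lemma enumerate_map_enumerate (f : Int × String → String) : ∀ (xs : List String) (s : Int),
    PySem.List.enumerate ((PySem.List.enumerate xs s).map f) s
      = (PySem.List.enumerate xs s).map (fun p => (p.1, f p)) := by
  intro xs
  induction xs with
  | nil => intro s; rfl
  | cons x xs ih => intro s; simp [PySem.List.enumerate_cons, ih (s + 1)]

-- first occurrences of xs not already in pre (pre read only through membership)
def firstsAux (pre : List String) : List String → List String
  | [] => []
  | x :: xs => if x ∈ pre then firstsAux pre xs else x :: firstsAux (x :: pre) xs

lemma firstsAux_congr : ∀ (xs pre pre' : List String), (∀ a, a ∈ pre ↔ a ∈ pre') →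
    firstsAux pre xs = firstsAux pre' xs := by
  intro xs
  induction xs with
  | nil => intro _ _ _; rfl
  | cons x xs ih =>
    intro pre pre' h
    simp only [firstsAux]
    by_cases hx : x ∈ pre
    · rw [if_pos hx, if_pos ((h x).1 hx)]; exact ih pre pre' h
    · rw [if_neg hx, if_neg (fun hc => hx ((h x).2 hc)), ih (x :: pre) (x :: pre')]
      intro a; simp only [List.mem_cons, h a]

lemma update_eq_firsts : ∀ (xs pre : List String),
    PySem.Set.update pre xs = pre ++ firstsAux pre xs := by
  intro xs
  induction xs with
  | nil => intro pre; simp [PySem.Set.update, firstsAux]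
  | cons x xs ih =>
    intro pre
    have hstep : PySem.Set.update pre (x :: xs) = PySem.Set.update (PySem.Set.add pre x) xs := rfl
    by_cases hx : x ∈ pre
    · have ha : PySem.Set.add pre x = pre := by simp [PySem.Set.add, hx]
      rw [hstep, ha, ih pre]
      simp [firstsAux, hx]
    · have ha : PySem.Set.add pre x = pre ++ [x] := by simp [PySem.Set.add, hx]
      rw [hstep, ha, ih (pre ++ [x]),
        firstsAux_congr xs (pre ++ [x]) (x :: pre) (by intro a; simp; tauto)]
      simp [firstsAux, hx]

lemma filter_take_eq_firsts : ∀ (xs pre : List String),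
    ((PySem.List.enumerate xs (pre.length : Int)).filter
      (fun p => !decide (p.2 ∈ (pre ++ xs).take p.1.toNat))).map (·.2) = firstsAux pre xs := by
  intro xs
  induction xs with
  | nil => intro pre; rfl
  | cons x xs ih =>
    intro pre
    rw [PySem.List.enumerate_cons, List.filter_cons]
    have htake : (pre ++ x :: xs).take ((pre.length : Int)).toNat = pre := by
      simp [List.take_left']
    have hassoc : pre ++ x :: xs = (pre ++ [x]) ++ xs := by simp
    have hlen : (pre.length : Int) + 1 = (((pre ++ [x]).length : Nat) : Int) := by
      push_cast; simp
    have htail : ((PySem.List.enumerate xs ((pre.length : Int) + 1)).filter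
        (fun p => !decide (p.2 ∈ (pre ++ x :: xs).take p.1.toNat))).map (·.2)
        = firstsAux (pre ++ [x]) xs := by
      rw [hassoc, hlen]; exact ih (pre ++ [x])
    by_cases hx : x ∈ pre
    · rw [if_neg (by simp [htake, hx])]
      rw [htail, firstsAux_congr xs (pre ++ [x]) pre (by intro a; simp; rintro rfl; exact hx)]
      simp [firstsAux, hx]
    · rw [if_pos (by simp [htake, hx])]
      simp only [List.map_cons, htail]
      rw [firstsAux_congr xs (pre ++ [x]) (x :: pre) (by intro a; simp; tauto)]
      simp [firstsAux, hx]

lemma index_firsts : ∀ (xs pre : List String) (x : String), x ∈ xs → x ∉ pre →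
    PySem.List.index? (firstsAux pre xs) x
      = some (firstsAux pre (xs.take ((PySem.List.index? xs x).getD 0))).length := by
  intro xs
  induction xs with
  | nil => intro pre x hx; simp at hx
  | cons y xs ih =>
    intro pre x hx hpre
    by_cases hxy : x = y
    · subst hxy
      have h1 : firstsAux pre (x :: xs) = x :: firstsAux (x :: pre) xs := by
        simp [firstsAux, hpre]
      rw [h1, PySem.List.index?_cons_self, PySem.List.index?_cons_self]
      rfl
    · have hxs : x ∈ xs := (List.mem_cons.1 hx).resolve_left hxy
      obtain ⟨k, hk⟩ := Option.isSome_iff_exists.1 ((PySem.List.index?_isSome_iff xs x).2 hxs)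
      have hidx : PySem.List.index? (y :: xs) x = some (k + 1) := by
        rw [PySem.List.index?_cons_of_ne _ (fun h => hxy h.symm), hk]; rfl
      by_cases hy : y ∈ pre
      · simp only [firstsAux, if_pos hy]
        rw [ih pre x hxs hpre, hidx, hk]
        simp [List.take_succ_cons, firstsAux, hy]
      · simp only [firstsAux, if_neg hy]
        rw [PySem.List.index?_cons_of_ne _ (fun h => hxy h.symm)]
        rw [ih (y :: pre) x hxs (by simp [hxy, hpre])]
        rw [hidx, hk]
        simp [List.take_succ_cons, firstsAux, hy]

theorem build_merge_mapping_spec : Claim_equal_build_merge_mapping := by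
  intro oc mi t mn _ _
  show build_merge_mapping oc mi t mn = build_merge_mapping_alt oc mi t mn
  simp only [build_merge_mapping, build_merge_mapping_alt]
  set g : Int × String → Int × String := fun p => (p.1, if p.1 ∈ mi then mn else p.2) with hg
  set eff : List String := (PySem.List.enumerate oc).map (fun p => if p.1 ∈ mi then mn else p.2) with heff
  -- the second loop of A is the uniform fold over the effective-name pairs
  have h1 : List.foldl (aSecondStep mi mn) (PySem.Set.empty, ([] : List String), PySem.Dict.empty)
      (PySem.List.enumerate oc)
      = List.foldl uStep ([], [], PySem.Dict.empty) ((PySem.List.enumerate oc).map g) := by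
    rw [List.foldl_map]
    exact PySem.List.foldl_congr_mem _ _ _ _ (fun acc p _ => aSecond_eq_uStep mi mn acc p)
  have hsnd : ((PySem.List.enumerate oc).map g).map (·.2) = eff := by
    rw [List.map_map]; rfl
  have hD : PySem.Set.update ([] : List String) (((PySem.List.enumerate oc).map g).map (·.2))
      = firstsAux [] eff := by
    rw [hsnd, update_eq_firsts]; rfl
  have h2 := loopU ((PySem.List.enumerate oc).map g) [] PySem.Dict.empty
  rw [hD] at h2
  rw [h1, h2]
  have henum : PySem.List.enumerate eff = (PySem.List.enumerate oc).map g := by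
    rw [heff, enumerate_map_enumerate]
  -- B's dedup list is the same firsts list
  have hfilter : ((PySem.List.enumerate eff).filter
      (fun p => !decide (p.2 ∈ PySem.List.slice eff none (some p.1)))).map (·.2)
      = firstsAux [] eff := by
    have hcongr : (PySem.List.enumerate eff).filter
        (fun p => !decide (p.2 ∈ PySem.List.slice eff none (some p.1)))
        = (PySem.List.enumerate eff).filter
        (fun p => !decide (p.2 ∈ eff.take p.1.toNat)) := by
      apply List.filter_congr
      intro p hp
      obtain ⟨k, hk, rfl⟩ := (PySem.List.mem_enumerate_iff _ _ _).1 hp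
      rw [PySem.List.slice_to _ (by positivity)]
    rw [hcongr]
    have := filter_take_eq_firsts eff []
    simpa using this
  -- B's map values equal A's map values
  have h3 : List.foldl (fun (d : PySem.Dict Int Int) (p : Int × String) => d.insert p.1
        ((PySem.Set.ofList (PySem.List.slice eff none
          (some (((PySem.List.index? eff p.2).getD 0 : Nat) : Int)))).length : Int))
        PySem.Dict.empty (PySem.List.enumerate eff)
      = List.foldl (fun (d : PySem.Dict Int Int) (p : Int × String) => d.insert p.1
        (((PySem.List.index? (firstsAux [] eff) p.2).getD 0 : Nat) : Int))
        PySem.Dict.empty ((PySem.List.enumerate oc).map g) := by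
    rw [henum]
    apply PySem.List.foldl_congr_mem
    intro acc p hp
    obtain ⟨q, hq, rfl⟩ := List.mem_map.1 hp
    have hmemeff : (g q).2 ∈ eff := by
      rw [heff]; exact List.mem_map.2 ⟨q, hq, rfl⟩
    set k : Nat := (PySem.List.index? eff (g q).2).getD 0 with hkdef
    have hslice : PySem.List.slice eff none (some ((k : Nat) : Int)) = eff.take k := by
      rw [PySem.List.slice_to _ (by positivity)]
      simp
    rw [hslice]
    have hofl : PySem.Set.ofList (eff.take k) = firstsAux [] (eff.take k) := by
      have : PySem.Set.ofList (eff.take k) = PySem.Set.update [] (eff.take k) := rfl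
      rw [this, update_eq_firsts]; rfl
    rw [hofl]
    rw [index_firsts eff [] (g q).2 hmemeff (by simp)]
    rfl
  rw [hfilter, h3]

theorem build_merge_mapping_raises : Claim_raises_build_merge_mapping := by
  unfold Claim_raises_build_merge_mapping
  refine ⟨?_, by decide⟩
  rintro oc mi t mn _ ⟨k, hk, hmem, hfirst, h0, hlt⟩ hpre
  rcases hpre k hk hmem hfirst with h | h <;> omega

-- self-check: the raise witness itself falls outside Pre_ (via the first half of the raises claim)
theorem pvRaiseWitnessOutsidePre_ok :
    ¬ Pre_build_merge_mapping ["a", "b"] [1] 0 "m" :=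
  build_merge_mapping_raises.1 ["a", "b"] [1] 0 "m" (by decide) (by decide)
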